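-- pv_equiv track=rewrite | github.com/strubelab/CoolerCodonOpt | scripts/sequence_utils.py | detect_ATA_ATA
-- ===== SOURCE A (Python) =====
-- def detect_ATA_ATA(sequence:str) -> bool:
--     """
--     Detects the presence of two consecutive ATA codons in the given DNA sequence
--
--     Input
--     -----
--     sequence : str
--     """
--
--     codon_positions = list(range(0,len(sequence), 3))
--
--     for index in codon_positions:
--         icodon = sequence[index:index+3]
--
--         if icodon == 'ATA':
--
--             if index+3 < len(sequence):
--                 jcodon = sequence[index+3:index+6]
--
--                 if jcodon == 'ATA':
--                     return True
--
--     return False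
-- ===== SOURCE B (Python) =====
-- def detect_ATA_ATA(sequence: str) -> bool:
--     idx = sequence.find('ATAATA')
--     while idx != -1:
--         if idx % 3 == 0:
--             return True
--         idx = sequence.find('ATAATA', idx + 1)
--     return False
-- ===== Notes on version B (the rewrite author's own statement) =====
-- stated objective: idiomatic
-- what changed: Replaced the per-codon slice-and-compare scan with a C-level str.find substring search for the six-character double-ATA pattern, skipping to successive occurrences and checking codon alignment (idx % 3 == 0).
import Mathlib
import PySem

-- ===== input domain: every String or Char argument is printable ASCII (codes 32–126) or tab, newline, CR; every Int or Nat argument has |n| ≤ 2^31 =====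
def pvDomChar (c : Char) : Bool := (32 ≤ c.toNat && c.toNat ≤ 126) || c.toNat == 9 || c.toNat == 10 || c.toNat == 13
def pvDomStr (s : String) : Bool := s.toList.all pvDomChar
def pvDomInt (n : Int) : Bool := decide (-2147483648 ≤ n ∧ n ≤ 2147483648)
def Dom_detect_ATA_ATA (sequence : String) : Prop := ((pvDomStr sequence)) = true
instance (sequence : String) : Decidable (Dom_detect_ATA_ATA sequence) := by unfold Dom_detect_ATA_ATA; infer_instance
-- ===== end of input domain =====

-- B replaces A's per-codon slice scan by a substring search for "ATAATA" with a codon-alignment check (idiomatic find-loop).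

-- ===== PORT A =====
-- the for-loop over codon_positions with early 'return True'
def detectLoopA (s : List Char) : List Int → Bool
  | [] => false
  | index :: rest =>
    let icodon := PySem.List.slice s (some index) (some (index + 3))
    if icodon = ['A', 'T', 'A'] then
      if index + 3 < (s.length : Int) then
        let jcodon := PySem.List.slice s (some (index + 3)) (some (index + 6))
        if jcodon = ['A', 'T', 'A'] then true
        else detectLoopA s rest
      else detectLoopA s rest
    else detectLoopA s rest

def detect_ATA_ATA (sequence : String) : Bool :=
  detectLoopA sequence.toList (PySem.List.pyRange 0 (PySem.Str.len sequence) 3)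

-- ===== PORT B =====
-- the while-loop 'while idx != -1: …'; fuel only makes the recursion structural (length + 1 iterations always suffice,
-- since each successive find starts strictly further right)
def detectLoopB (sequence : String) : Nat → Int → Bool
  | 0, _ => false
  | fuel + 1, idx =>
    if idx = -1 then false
    else if PySem.Int.mod idx 3 = 0 then true
    else detectLoopB sequence fuel (PySem.Str.findFrom sequence "ATAATA" (idx + 1) none)

def detect_ATA_ATA_alt (sequence : String) : Bool :=
  detectLoopB sequence (sequence.toList.length + 1) (PySem.Str.find sequence "ATAATA")

-- ===== PRECONDITION & SPEC =====
def Spec_detect_ATA_ATA (sequence : String) (out : Bool) : Prop := out = detect_ATA_ATA_alt sequence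
instance (sequence : String) (out : Bool) : Decidable (Spec_detect_ATA_ATA sequence out) := by unfold Spec_detect_ATA_ATA; infer_instance

-- ===== CLAIM (what is proved, stated in full; the proofs are below) =====
def Claim_equal_detect_ATA_ATA : Prop := ∀ (sequence : String), Dom_detect_ATA_ATA sequence → Spec_detect_ATA_ATA sequence (detect_ATA_ATA sequence)

-- ===== LEMMAS AND PROOFS =====

-- common characterisation: "ATAATA" occurs at a codon-aligned position
def pvGood (s : List Char) : Prop :=
  ∃ i : Nat, i % 3 = 0 ∧ ['A', 'T', 'A', 'A', 'T', 'A'] <+: s.drop i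

theorem condA_iff (s : List Char) (j : Nat) :
    (PySem.List.slice s (some (j : Int)) (some ((j : Int) + 3)) = ['A', 'T', 'A'] ∧
      (j : Int) + 3 < (s.length : Int) ∧
      PySem.List.slice s (some ((j : Int) + 3)) (some ((j : Int) + 6)) = ['A', 'T', 'A']) ↔
    ['A', 'T', 'A', 'A', 'T', 'A'] <+: s.drop j := by
  have h1 : PySem.List.slice s (some (j : Int)) (some ((j : Int) + 3)) = (s.drop j).take 3 := by
    have := PySem.List.slice_natCast_add s j 3
    push_cast at this
    exact this
  have h2 : PySem.List.slice s (some ((j : Int) + 3)) (some ((j : Int) + 6)) = (s.drop (j + 3)).take 3 := by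
    have := PySem.List.slice_natCast_add s (j + 3) 3
    push_cast at this
    convert this using 3
  rw [h1, h2, List.prefix_iff_eq_take,
    show (['A', 'T', 'A', 'A', 'T', 'A'] : List Char).length = 6 from rfl]
  have hsplit : (s.drop j).take 6 = (s.drop j).take 3 ++ ((s.drop j).drop 3).take 3 := by
    rw [← List.take_add]
  have hdd : (s.drop j).drop 3 = s.drop (j + 3) := by
    rw [List.drop_drop]
  rw [hsplit, hdd]
  constructor
  · rintro ⟨ha, hlt, hb⟩
    rw [ha, hb]
    rfl
  · intro h
    rw [show (['A', 'T', 'A', 'A', 'T', 'A'] : List Char) = ['A', 'T', 'A'] ++ ['A', 'T', 'A'] from rfl] at h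
    have hlens := congrArg List.length h
    simp only [List.length_append, List.length_take, List.length_drop,
      List.length_cons, List.length_nil] at hlens
    have hx : ((s.drop j).take 3).length = 3 := by
      simp only [List.length_take, List.length_drop]
      omega
    have hinj := List.append_inj h.symm (by rw [hx]; rfl)
    refine ⟨hinj.1, by omega, hinj.2⟩

theorem detectLoopA_iff (s : List Char) (l : List Int) :
    detectLoopA s l = true ↔ ∃ index ∈ l,
      PySem.List.slice s (some index) (some (index + 3)) = ['A', 'T', 'A'] ∧
      index + 3 < (s.length : Int) ∧
      PySem.List.slice s (some (index + 3)) (some (index + 6)) = ['A', 'T', 'A'] := by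
  induction l with
  | nil => simp [detectLoopA]
  | cons a rest ih =>
    simp only [detectLoopA, List.exists_mem_cons_iff, ← ih]
    split_ifs with h1 h2 h3 <;> simp_all

theorem detectA_iff (s : String) : detect_ATA_ATA s = true ↔ pvGood s.toList := by
  rw [detect_ATA_ATA, detectLoopA_iff, PySem.Str.len_eq]
  constructor
  · rintro ⟨index, hmem, hcond⟩
    obtain ⟨h0, hlt, hdvd⟩ := (PySem.List.mem_pyRange_iff_of_pos (by norm_num) index).mp hmem
    obtain ⟨i, rfl⟩ : ∃ i : Nat, index = (i : Int) := ⟨index.toNat, (Int.toNat_of_nonneg h0).symm⟩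
    exact ⟨i, by omega, (condA_iff s.toList i).mp hcond⟩
  · rintro ⟨i, hmod, hocc⟩
    have hlen : i + 6 ≤ s.toList.length := by
      have := hocc.length_le
      simp only [List.length_drop] at this
      have : (6 : Nat) ≤ s.toList.length - i := this
      omega
    refine ⟨(i : Int), ?_, (condA_iff s.toList i).mpr hocc⟩
    exact (PySem.List.mem_pyRange_iff_of_pos (by norm_num) _).mpr ⟨by omega, by omega, by omega⟩

theorem detectLoopB_iff (s : String) (fuel k : Nat) (hk : k ≤ s.toList.length)
    (hf : s.toList.length + 1 ≤ fuel + k) :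
    detectLoopB s fuel (PySem.Chars.findFrom s.toList "ATAATA".toList (k : Int) none) = true ↔
      ∃ i : Nat, k ≤ i ∧ i % 3 = 0 ∧ ['A', 'T', 'A', 'A', 'T', 'A'] <+: s.toList.drop i := by
  induction fuel generalizing k with
  | zero => omega
  | succ f ih =>
    set idx := PySem.Chars.findFrom s.toList "ATAATA".toList (k : Int) none with hidxdef
    by_cases hidx : idx = -1
    · rw [detectLoopB, if_pos hidx]
      have hno : ¬ "ATAATA".toList <:+: s.toList.drop k :=
        (PySem.Chars.findFrom_natCast_eq_neg_one_iff s.toList "ATAATA".toList k hk).mp hidx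
      simp only [Bool.false_eq_true, false_iff]
      rintro ⟨i, hki, -, hocc⟩
      apply hno
      rw [← PySem.Chars.isIn_iff_infix, ← PySem.Chars.exists_prefix_drop_iff_isIn]
      exact ⟨i - k, by rw [List.drop_drop, show k + (i - k) = i by omega]; exact hocc⟩
    · obtain ⟨hle, hocc, hmin⟩ :=
        PySem.Chars.findFrom_natCast_spec s.toList "ATAATA".toList k hk hidx
      have h0 : (0 : Int) ≤ idx := le_trans (by omega) hle
      have hidxk : k ≤ idx.toNat := by omega
      have hlen6 : idx.toNat + 6 ≤ s.toList.length := by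
        have := hocc.length_le
        simp only [List.length_drop] at this
        have : (6 : Nat) ≤ s.toList.length - idx.toNat := this
        omega
      rw [detectLoopB, if_neg hidx]
      by_cases hm : PySem.Int.mod idx 3 = 0
      · rw [if_pos hm]
        simp only [true_iff]
        refine ⟨idx.toNat, hidxk, ?_, hocc⟩
        rw [PySem.Int.mod_eq_emod_of_pos (by norm_num)] at hm
        omega
      · rw [if_neg hm]
        rw [PySem.Int.mod_eq_emod_of_pos (by norm_num)] at hm
        rw [PySem.Str.findFrom_eq,
          show idx + 1 = ((idx.toNat + 1 : Nat) : Int) by omega]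
        rw [ih (idx.toNat + 1) (by omega) (by omega)]
        constructor
        · rintro ⟨i, hki, hmod, hocc'⟩
          exact ⟨i, by omega, hmod, hocc'⟩
        · rintro ⟨i, hki, hmod, hocc'⟩
          rcases lt_trichotomy i idx.toNat with hlt | heq | hgt
          · exact absurd hocc' (hmin i hki hlt)
          · subst heq
            exact absurd (by omega : idx % 3 = 0) hm
          · exact ⟨i, by omega, hmod, hocc'⟩

theorem detectB_iff (s : String) : detect_ATA_ATA_alt s = true ↔ pvGood s.toList := by
  rw [detect_ATA_ATA_alt, PySem.Str.find_eq, ← PySem.Chars.findFrom_zero,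
    show (0 : Int) = ((0 : Nat) : Int) from rfl]
  rw [detectLoopB_iff s (s.toList.length + 1) 0 (by omega) (by omega)]
  simp [pvGood]

-- ===== VERDICT (by name: the statement is the Claim_ definition above) =====
theorem detect_ATA_ATA_spec : Claim_equal_detect_ATA_ATA := by
  intro s _
  unfold Spec_detect_ATA_ATA
  exact Bool.eq_iff_iff.mpr ((detectA_iff s).trans (detectB_iff s).symm)
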